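-- pv_equiv track=rewrite | github.com/xiyaozhuang/aoc25 | src/aoc25/day02.py | get_prime_products
-- ===== SOURCE A (Python) =====
-- def get_prime_factorisation(n):
--     i = 2
--     prime_factorisation = []
--
--     while i**2 <= n:
--         if n % i == 0:
--             prime_factorisation.append(i)
--             n //= i
--
--         else:
--             i += 1
--
--     prime_factorisation.append(n)
--
--     return prime_factorisation
--
-- def get_prime_products(n):
--     # TODO: simplify
--     # Convert prime factorisation into (prime, exponent) pairs
--     primes = []
--     factors = get_prime_factorisation(n)
--
--     for prime in factors:
--         if not primes or primes[-1][0] != prime: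
--             primes.append([prime, 1])
--
--         else:
--             primes[-1][1] += 1
--
--     # Enumerate all divisors by choosing exponents for each prime
--     products = set([1])
--
--     for prime, exponent in primes:
--         new = set()
--
--         for base in products:
--             product = 1
--
--             for _ in range(exponent + 1):
--                 new.add(base * product)
--                 product *= prime
--
--         products = new
--
--     products = {d for d in products if d > 1}
--
--     return products
-- ===== SOURCE B (Python) =====
-- def get_prime_products(n):
--     # Direct divisor scan: no factorisation, no exponent enumeration.
--     divisors = set()
--     i = 1
--     while i * i <= n:
--         if n % i == 0:
--             divisors.add(i)
--             divisors.add(n // i)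
--         i += 1
--     return {d for d in divisors if d > 1}
-- ===== Notes on version B (the rewrite author's own statement) =====
-- stated objective: simpler
-- what changed: Replaces prime factorisation + exponent-choice enumeration of divisors with a single sqrt-bounded scan that records each divisor pair (i, n//i) directly.
import Mathlib
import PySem

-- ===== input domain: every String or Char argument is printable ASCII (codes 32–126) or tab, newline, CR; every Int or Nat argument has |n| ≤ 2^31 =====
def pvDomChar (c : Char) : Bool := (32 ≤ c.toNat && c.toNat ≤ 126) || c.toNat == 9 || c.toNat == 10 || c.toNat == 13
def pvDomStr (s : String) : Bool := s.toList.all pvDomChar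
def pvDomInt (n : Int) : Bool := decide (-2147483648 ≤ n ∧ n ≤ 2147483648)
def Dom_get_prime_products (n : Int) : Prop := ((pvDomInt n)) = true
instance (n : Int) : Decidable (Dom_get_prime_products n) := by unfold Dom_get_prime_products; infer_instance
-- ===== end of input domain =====

-- B replaces A's prime factorisation + exponent-choice enumeration with a direct
-- sqrt-bounded scan collecting divisor pairs (objective: simpler).
-- Both functions return a Python set (unordered); the ports represent that set
-- canonically as its elements in ascending order, and the equivalence proved is
-- equality of those canonical representations.

-- ===== PORT A =====
-- while i**2 <= n: … ; the 2 ≤ i hypothesis only serves Lean's termination proof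
-- (A's loop is always entered with i = 2).
def gpfLoop (i n : Int) (acc : List Int) (hi : 2 ≤ i) : List Int × Int :=
  if h : i ^ 2 ≤ n then
    if PySem.Int.mod n i = 0 then
      gpfLoop i (PySem.Int.floordiv n i) (acc ++ [i]) hi
    else
      gpfLoop (i + 1) n acc (by omega)
  else
    (acc, n)
termination_by (n.toNat, (n + 1 - i).toNat)
decreasing_by
  · apply Prod.Lex.left
    have hi0 : (0:Int) < i := by omega
    have hn4 : (4:Int) ≤ n := by nlinarith
    rw [PySem.Int.floordiv_eq_ediv_of_pos hi0]
    have h1 : n / i < n := Int.ediv_lt_of_lt_mul hi0 (by nlinarith)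
    omega
  · apply Prod.Lex.right
    have : i ≤ n := by nlinarith
    omega

def get_prime_factorisation (n : Int) : List Int :=
  (gpfLoop 2 n [] (by omega)).1 ++ [(gpfLoop 2 n [] (by omega)).2]

-- the (prime, exponent) grouping loop of A (Python mutates primes[-1][1] in place)
def groupStep (primes : List (Int × Int)) (prime : Int) : List (Int × Int) :=
  match primes.getLast? with
  | none => primes ++ [(prime, 1)]
  | some last =>
      if last.1 ≠ prime then primes ++ [(prime, 1)]
      else primes.dropLast ++ [(last.1, last.2 + 1)]

def get_prime_products (n : Int) : List Int :=
  -- factors := get_prime_factorisation n; primes := the (prime, exponent) grouping;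
  -- products := the exponent-choice enumeration over the groups, starting from {1};
  -- returned value: {d for d in products if d > 1} in canonical ascending order
  PySem.List.sorted
    (((((get_prime_factorisation n).foldl groupStep []).foldl
          (fun products pe =>
            products.foldl (fun new base =>
                ((PySem.List.pyRange 0 (pe.2 + 1) 1).foldl
                    (fun st _ => (st.1.add (base * st.2), st.2 * pe.1)) (new, (1:Int))).1)
              (PySem.Set.ofList []))
          (PySem.Set.ofList [1]))).foldl
        (fun s d => if 1 < d then PySem.Set.add s d else s) (PySem.Set.ofList []))
    (fun x => x)

-- ===== PORT B =====
-- while i * i <= n: … ; the 1 ≤ i hypothesis only serves Lean's termination proof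
-- (B's loop starts at i = 1).
def divLoop (n i : Int) (divs : PySem.Set Int) (hi : 1 ≤ i) : PySem.Set Int :=
  if h : i * i ≤ n then
    divLoop n (i + 1)
      (if PySem.Int.mod n i = 0 then (divs.add i).add (PySem.Int.floordiv n i) else divs)
      (by omega)
  else divs
termination_by (n + 1 - i).toNat
decreasing_by
  have : i ≤ n := by nlinarith
  omega

def get_prime_products_alt (n : Int) : List Int :=
  let divisors := divLoop n 1 (PySem.Set.ofList []) (by omega)
  -- {d for d in divisors if d > 1}, returned in canonical ascending order
  PySem.List.sorted
    (divisors.foldl (fun s d => if 1 < d then PySem.Set.add s d else s) (PySem.Set.ofList []))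
    (fun x => x)



-- ===== PRECONDITION & SPEC =====
def Spec_get_prime_products (n : Int) (out : List Int) : Prop := out = get_prime_products_alt n
instance (n : Int) (out : List Int) : Decidable (Spec_get_prime_products n out) := by unfold Spec_get_prime_products; infer_instance

-- ===== CLAIM (what is proved, stated in full; the proofs are below) =====
def Claim_equal_get_prime_products : Prop := ∀ (n : Int), Dom_get_prime_products n → Spec_get_prime_products n (get_prime_products n)

-- ===== LEMMAS AND PROOFS =====

lemma mem_filtAdd (l : List Int) : ∀ (s : PySem.Set Int) (x : Int),
    x ∈ l.foldl (fun s d => if 1 < d then PySem.Set.add s d else s) s ↔ x ∈ s ∨ (x ∈ l ∧ 1 < x) := by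
  induction l with
  | nil => simp
  | cons a t ih =>
    intro s x
    simp only [List.foldl_cons, ih]
    by_cases ha : 1 < a
    · simp only [if_pos ha, PySem.Set.mem_add, List.mem_cons]
      constructor
      · rintro ((hs | rfl) | ⟨ht, hx⟩)
        · exact Or.inl hs
        · exact Or.inr ⟨Or.inl rfl, ha⟩
        · exact Or.inr ⟨Or.inr ht, hx⟩
      · rintro (hs | ⟨rfl | ht, hx⟩)
        · exact Or.inl (Or.inl hs)
        · exact Or.inl (Or.inr rfl)
        · exact Or.inr ⟨ht, hx⟩
    · simp only [if_neg ha, List.mem_cons]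
      constructor
      · rintro (hs | ⟨ht, hx⟩)
        · exact Or.inl hs
        · exact Or.inr ⟨Or.inr ht, hx⟩
      · rintro (hs | ⟨rfl | ht, hx⟩)
        · exact Or.inl hs
        · exact absurd hx ha
        · exact Or.inr ⟨ht, hx⟩

lemma nodup_filtAdd (l : List Int) : ∀ (s : PySem.Set Int), s.Nodup →
    (l.foldl (fun s d => if 1 < d then PySem.Set.add s d else s) s).Nodup := by
  induction l with
  | nil => exact fun s h => h
  | cons a t ih =>
    intro s hs
    simp only [List.foldl_cons]
    split
    · exact ih _ (PySem.Set.nodup_add _ _ hs)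
    · exact ih _ hs

lemma divLoop_mem (n : Int) : ∀ (i : Int) (divs : PySem.Set Int) (hi : 1 ≤ i) (x : Int),
    x ∈ divLoop n i divs hi ↔
      x ∈ divs ∨ ∃ j, i ≤ j ∧ j * j ≤ n ∧ PySem.Int.mod n j = 0 ∧
        (x = j ∨ x = PySem.Int.floordiv n j) := by
  intro i divs hi x
  fun_induction divLoop n i divs hi with
  | case1 i divs hi h ih =>
    simp only [dite_eq_ite] at ih
    rw [ih]
    constructor
    · rintro (hd | ⟨j, hj⟩)
      · split at hd
        · rcases (PySem.Set.mem_add _ _ _).1 hd with hd' | rfl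
          · rcases (PySem.Set.mem_add _ _ _).1 hd' with hd'' | rfl
            · exact Or.inl hd''
            · exact Or.inr ⟨x, le_refl x, h, by assumption, Or.inl rfl⟩
          · exact Or.inr ⟨i, le_refl i, h, by assumption, Or.inr rfl⟩
        · exact Or.inl hd
      · exact Or.inr ⟨j, by omega, hj.2⟩
    · rintro (hd | ⟨j, hj1, hj2, hj3, hj4⟩)
      · left; split
        · exact (PySem.Set.mem_add _ _ _).2 (Or.inl ((PySem.Set.mem_add _ _ _).2 (Or.inl hd)))
        · exact hd
      · by_cases hji : i + 1 ≤ j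
        · exact Or.inr ⟨j, hji, hj2, hj3, hj4⟩
        · have : j = i := by omega
          subst this
          left
          rw [if_pos hj3]
          rcases hj4 with rfl | rfl
          · exact (PySem.Set.mem_add _ _ _).2 (Or.inl ((PySem.Set.mem_add _ _ _).2 (Or.inr rfl)))
          · exact (PySem.Set.mem_add _ _ _).2 (Or.inr rfl)
  | case2 i divs hi h =>
    simp only [iff_self_or]
    rintro ⟨j, hj1, hj2, _⟩
    exact absurd hj2 (by nlinarith)

lemma B_mem (n : Int) (hn : 1 ≤ n) (x : Int) (hi : (1:Int) ≤ 1) :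
    x ∈ divLoop n 1 (PySem.Set.ofList []) hi ↔ (1 ≤ x ∧ x ∣ n) := by
  rw [divLoop_mem]
  simp only [PySem.Set.mem_ofList, List.not_mem_nil, false_or]
  constructor
  · rintro ⟨j, hj1, hj2, hj3, hx⟩
    rcases hx with rfl | rfl
    · exact ⟨hj1, (PySem.Int.mod_eq_zero_iff_dvd _ _).1 hj3⟩
    · have hj0 : (0:Int) < j := by omega
      have hdvd : j ∣ n := (PySem.Int.mod_eq_zero_iff_dvd n j).1 hj3
      rw [PySem.Int.floordiv_eq_ediv_of_pos hj0]
      constructor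
      · rw [Int.le_ediv_iff_mul_le hj0]; nlinarith
      · exact Int.ediv_dvd_of_dvd hdvd
  · rintro ⟨hx1, hdvd⟩
    have hx0 : (0:Int) < x := by omega
    obtain ⟨y, hy⟩ := hdvd
    have hy0 : (0:Int) < y := by nlinarith
    by_cases hxx : x * x ≤ n
    · exact ⟨x, hx1, hxx, (PySem.Int.mod_eq_zero_iff_dvd n x).2 ⟨y, hy⟩, Or.inl rfl⟩
    · refine ⟨y, by omega, by nlinarith, (PySem.Int.mod_eq_zero_iff_dvd n y).2 ⟨x, by linarith [hy, mul_comm x y]⟩, Or.inr ?_⟩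
      rw [PySem.Int.floordiv_eq_ediv_of_pos hy0, hy, mul_comm x y, Int.mul_ediv_cancel_left _ hy0.ne']

lemma prime_of_min_div (i n : Int) (h2 : 2 ≤ i) (hdvd : i ∣ n)
    (hmin : ∀ j : Int, 2 ≤ j → j < i → ¬ j ∣ n) : Prime i := by
  rw [Int.prime_iff_natAbs_prime]
  rw [Nat.prime_def_lt]
  refine ⟨by omega, fun m hm hmd => ?_⟩
  by_contra hm1
  have hm2 : 2 ≤ m := by
    rcases Nat.lt_or_ge m 2 with h | h
    · interval_cases m
      · simp at hmd; omega
      · exact absurd rfl hm1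
    · exact h
  have hmi : (m : Int) ∣ i := by
    have := Int.natCast_dvd_natCast.2 hmd
    rwa [Int.natAbs_of_nonneg (by omega : (0:Int) ≤ i)] at this
  exact hmin m (by exact_mod_cast hm2)
    (by have := Int.natAbs_of_nonneg (by omega : (0:Int) ≤ i); omega) (hmi.trans hdvd)

lemma prime_of_no_small (n i : Int) (hn : 2 ≤ n) (h2 : 2 ≤ i)
    (hmin : ∀ j : Int, 2 ≤ j → j < i → ¬ j ∣ n) (hbig : ¬ i ^ 2 ≤ n) : Prime n := by
  rw [Int.prime_iff_natAbs_prime]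
  by_contra hnp
  have hna : (n.natAbs : Int) = n := Int.natAbs_of_nonneg (by omega)
  have hne1 : n.natAbs ≠ 1 := by omega
  have hfp := Nat.minFac_prime hne1
  have hsq : n.natAbs.minFac ^ 2 ≤ n.natAbs := Nat.minFac_sq_le_self (by omega) hnp
  have hdvd : (n.natAbs.minFac : Int) ∣ n := by
    rw [← hna]; exact_mod_cast Nat.minFac_dvd n.natAbs
  have h2f : (2 : Int) ≤ (n.natAbs.minFac : Int) := by exact_mod_cast hfp.two_le
  have hlt : ¬ ((n.natAbs.minFac : Int) < i) := fun hlt => hmin _ h2f hlt hdvd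
  apply hbig
  have hile : i ≤ (n.natAbs.minFac : Int) := by omega
  have hsq' : (n.natAbs.minFac : Int) ^ 2 ≤ n := by rw [← hna]; exact_mod_cast hsq
  nlinarith

lemma gpfLoop_spec (i n : Int) (acc : List Int) (hi : 2 ≤ i) :
    2 ≤ n → (∀ j : Int, 2 ≤ j → j < i → ¬ j ∣ n) →
    ∃ S : List Int,
      (gpfLoop i n acc hi).1 = acc ++ S ∧
      (S ++ [(gpfLoop i n acc hi).2]).prod = n ∧
      (∀ q ∈ S ++ [(gpfLoop i n acc hi).2], 0 < q ∧ Prime q) := by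
  fun_induction gpfLoop i n acc hi with
  | case1 i n acc hi h hm ih =>
    intro hn hmin
    have hi0 : (0:Int) < i := by omega
    have hdvd : i ∣ n := (PySem.Int.mod_eq_zero_iff_dvd n i).1 hm
    have hfd : PySem.Int.floordiv n i = n / i := PySem.Int.floordiv_eq_ediv_of_pos hi0
    have hn'2 : 2 ≤ PySem.Int.floordiv n i := by
      rw [hfd]
      have : i ≤ n / i := by rw [Int.le_ediv_iff_mul_le hi0]; nlinarith
      omega
    have hmin' : ∀ j : Int, 2 ≤ j → j < i → ¬ j ∣ PySem.Int.floordiv n i := by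
      intro j hj2 hji hjd
      exact hmin j hj2 hji (hjd.trans (by rw [hfd]; exact Int.ediv_dvd_of_dvd hdvd))
    obtain ⟨S, h1, h2, h3⟩ := ih hn'2 hmin'
    refine ⟨i :: S, by rw [h1]; simp, ?_, ?_⟩
    · rw [List.cons_append, List.prod_cons, h2, hfd]
      exact Int.mul_ediv_cancel' hdvd
    · intro q hq
      rcases List.mem_cons.1 hq with rfl | hq'
      · exact ⟨by omega, prime_of_min_div q n (by omega) hdvd hmin⟩
      · exact h3 q hq'
  | case2 i n acc hi h hm ih =>
    intro hn hmin
    apply ih hn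
    intro j hj2 hji hjd
    by_cases hji' : j = i
    · subst hji'
      exact hm ((PySem.Int.mod_eq_zero_iff_dvd n j).2 hjd)
    · exact hmin j hj2 (by omega) hjd
  | case3 i n acc hi h =>
    intro hn hmin
    refine ⟨[], by simp, by simp, ?_⟩
    intro q hq
    simp at hq
    rcases hq with rfl
    exact ⟨by omega, prime_of_no_small _ _ hn hi hmin h⟩

lemma factorisation_spec (n : Int) (hn : 2 ≤ n) :
    (get_prime_factorisation n).prod = n ∧
    ∀ q ∈ get_prime_factorisation n, 0 < q ∧ Prime q := by
  obtain ⟨S, h1, h2, h3⟩ := gpfLoop_spec 2 n [] (by omega) hn (by omega)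
  unfold get_prime_factorisation
  rw [h1]
  exact ⟨by simpa using h2, by simpa using h3⟩

def prodG (G : List (Int × Int)) : Int := (G.map (fun pe => pe.1 ^ pe.2.toNat)).prod

lemma groupStep_spec (acc : List (Int × Int)) (f : Int) (hacc : ∀ pe ∈ acc, 1 ≤ pe.2) :
    prodG (groupStep acc f) = prodG acc * f ∧
    (∀ pe ∈ groupStep acc f, (pe.1 = f ∨ pe.1 ∈ acc.map Prod.fst) ∧ 1 ≤ pe.2) := by
  cases hl : acc.getLast? with
  | none =>
    have hacc0 : acc = [] := List.getLast?_eq_none_iff.1 hl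
    subst hacc0
    simp only [groupStep, List.getLast?_nil]
    constructor
    · simp [prodG]
    · rintro pe hpe
      simp at hpe
      subst hpe
      exact ⟨Or.inl rfl, by omega⟩
  | some last =>
    obtain ⟨l', rfl⟩ := List.getLast?_eq_some_iff.1 hl
    have hl' : (l' ++ [last]).getLast? = some last := by simp
    simp only [groupStep, hl']
    have hdrop : (l' ++ [last]).dropLast = l' := by simp
    by_cases hne : last.1 ≠ f
    · rw [if_pos hne]
      constructor
      · simp [prodG]; ring
      · rintro pe hpe
        rcases List.mem_append.1 hpe with hpe' | hpe'
        · exact ⟨Or.inr (List.mem_map_of_mem hpe'), hacc pe hpe'⟩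
        · simp at hpe'
          subst hpe'
          exact ⟨Or.inl rfl, by omega⟩
    · rw [if_neg hne]
      rw [not_not] at hne
      rw [hdrop]
      have hlast : 1 ≤ last.2 := hacc last (by simp)
      constructor
      · simp only [prodG, List.map_append, List.prod_append, List.map_cons, List.map_nil,
          List.prod_cons, List.prod_nil]
        have : last.1 ^ (last.2 + 1).toNat = last.1 ^ last.2.toNat * last.1 := by
          rw [show (last.2 + 1).toNat = last.2.toNat + 1 by omega, pow_succ]
        rw [this, hne]
        ring
      · rintro pe hpe
        rcases List.mem_append.1 hpe with hpe' | hpe'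
        · exact ⟨Or.inr (List.mem_map_of_mem (List.mem_append_left [last] hpe')), hacc pe (List.mem_append_left [last] hpe')⟩
        · simp at hpe'
          subst hpe'
          exact ⟨Or.inl hne, by omega⟩

lemma group_fold_spec (F : List Int) : ∀ (acc : List (Int × Int)), (∀ pe ∈ acc, 1 ≤ pe.2) →
    prodG (F.foldl groupStep acc) = prodG acc * F.prod ∧
    ∀ pe ∈ F.foldl groupStep acc, (pe.1 ∈ F ∨ pe.1 ∈ acc.map Prod.fst) ∧ 1 ≤ pe.2 := by
  induction F with
  | nil => intro acc hacc; exact ⟨by simp [prodG], fun pe hpe => ⟨Or.inr (List.mem_map_of_mem hpe), hacc pe hpe⟩⟩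
  | cons f t ih =>
    intro acc hacc
    obtain ⟨hs1, hs2⟩ := groupStep_spec acc f hacc
    obtain ⟨h1, h2⟩ := ih (groupStep acc f) (fun pe hpe => (hs2 pe hpe).2)
    constructor
    · rw [List.foldl_cons, h1, hs1, List.prod_cons]; ring
    · intro pe hpe
      obtain ⟨hmem, hle⟩ := h2 pe hpe
      refine ⟨?_, hle⟩
      rcases hmem with hmem | hmem
      · exact Or.inl (List.mem_cons_of_mem f hmem)
      · obtain ⟨pe', hpe', heq⟩ := List.mem_map.1 hmem
        obtain ⟨hfst, _⟩ := hs2 pe' hpe'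
        rcases hfst with hfst | hfst
        · left; rw [← heq, hfst]; exact List.mem_cons_self ..
        · right; rw [← heq]; exact hfst

lemma powFold_spec (p base : Int) : ∀ (k : Nat) (s : PySem.Set Int) (q : Int),
    ((PySem.List.pyRange 0 (k:Int) 1).foldl
        (fun st _ => (PySem.Set.add st.1 (base * st.2), st.2 * p)) (s, q)).2 = q * p ^ k ∧
    (∀ x, x ∈ ((PySem.List.pyRange 0 (k:Int) 1).foldl
        (fun st _ => (PySem.Set.add st.1 (base * st.2), st.2 * p)) (s, q)).1 ↔
      x ∈ s ∨ ∃ j, j < k ∧ x = base * (q * p ^ j)) ∧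
    (s.Nodup → ((PySem.List.pyRange 0 (k:Int) 1).foldl
        (fun st _ => (PySem.Set.add st.1 (base * st.2), st.2 * p)) (s, q)).1.Nodup) := by
  intro k
  induction k with
  | zero =>
    intro s q
    rw [PySem.List.pyRange_one_eq_nil (by omega)]
    refine ⟨by simp, fun x => by simp, fun h => h⟩
  | succ k ih =>
    intro s q
    have hcast : ((k+1 : Nat) : Int) = (k : Int) + 1 := by push_cast; ring
    rw [hcast, PySem.List.pyRange_one_succ_right (by omega), List.foldl_append]
    obtain ⟨ih1, ih2, ih3⟩ := ih s q
    refine ⟨?_, ?_, ?_⟩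
    · simp only [List.foldl_cons, List.foldl_nil]
      rw [ih1]; ring
    · intro x
      simp only [List.foldl_cons, List.foldl_nil, PySem.Set.mem_add, ih2, ih1]
      constructor
      · rintro ((hs | ⟨j, hj, rfl⟩) | rfl)
        · exact Or.inl hs
        · exact Or.inr ⟨j, by omega, rfl⟩
        · exact Or.inr ⟨k, by omega, rfl⟩
      · rintro (hs | ⟨j, hj, rfl⟩)
        · exact Or.inl (Or.inl hs)
        · by_cases hjk : j = k
          · subst hjk; exact Or.inr rfl
          · exact Or.inl (Or.inr ⟨j, by omega, rfl⟩)
    · intro hs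
      simp only [List.foldl_cons, List.foldl_nil]
      exact PySem.Set.nodup_add _ _ (ih3 hs)

lemma baseFold_spec (p eI : Int) (k : Nat) (hk : eI = (k:Int)) :
    ∀ (bases : List Int) (s : PySem.Set Int),
    (∀ x, x ∈ bases.foldl (fun new base =>
        ((PySem.List.pyRange 0 eI 1).foldl
            (fun st _ => (PySem.Set.add st.1 (base * st.2), st.2 * p)) (new, (1:Int))).1) s ↔
      x ∈ s ∨ ∃ b ∈ bases, ∃ j, j < k ∧ x = b * p ^ j) ∧
    (s.Nodup → (bases.foldl (fun new base =>
        ((PySem.List.pyRange 0 eI 1).foldl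
            (fun st _ => (PySem.Set.add st.1 (base * st.2), st.2 * p)) (new, (1:Int))).1) s).Nodup) := by
  subst hk
  intro bases
  induction bases with
  | nil => intro s; exact ⟨fun x => by simp, fun h => h⟩
  | cons b t ih =>
    intro s
    obtain ⟨p1, p2, p3⟩ := powFold_spec p b k s 1
    obtain ⟨i1, i2⟩ := ih (((PySem.List.pyRange 0 (k:Int) 1).foldl
        (fun st _ => (PySem.Set.add st.1 (b * st.2), st.2 * p)) (s, (1:Int))).1)
    refine ⟨?_, ?_⟩
    · intro x
      rw [List.foldl_cons, i1, p2]
      constructor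
      · rintro ((hs | ⟨j, hj, rfl⟩) | ⟨b', hb', j, hj, rfl⟩)
        · exact Or.inl hs
        · exact Or.inr ⟨b, List.mem_cons_self .., j, hj, by ring⟩
        · exact Or.inr ⟨b', List.mem_cons_of_mem b hb', j, hj, rfl⟩
      · rintro (hs | ⟨b', hb', j, hj, rfl⟩)
        · exact Or.inl (Or.inl hs)
        · rcases List.mem_cons.1 hb' with rfl | hb''
          · exact Or.inl (Or.inr ⟨j, hj, by ring⟩)
          · exact Or.inr ⟨b', hb'', j, hj, rfl⟩
    · intro hs
      rw [List.foldl_cons]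
      exact i2 (p3 hs)

lemma nat_decomp (p M : ℕ) (hp : p.Prime) : ∀ (e d : ℕ), d ∣ M * p ^ e →
    ∃ b j, b ∣ M ∧ j ≤ e ∧ d = b * p ^ j := by
  intro e
  induction e with
  | zero => intro d hd; exact ⟨d, 0, by simpa using hd, le_refl 0, by simp⟩
  | succ e ih =>
    intro d hd
    by_cases hpd : p ∣ d
    · obtain ⟨d', rfl⟩ := hpd
      have hd' : d' ∣ M * p ^ e := by
        have hrw : M * p ^ (e+1) = p * (M * p ^ e) := by ring
        rw [hrw] at hd
        exact (Nat.mul_dvd_mul_iff_left hp.pos).1 hd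
      obtain ⟨b, j, hb, hj, rfl⟩ := ih d' hd'
      exact ⟨b, j+1, hb, by omega, by ring⟩
    · have hcop : Nat.Coprime d (p ^ (e+1)) :=
        (((Nat.Prime.coprime_iff_not_dvd hp).2 hpd).symm.pow_right _)
      exact ⟨d, 0, hcop.dvd_of_dvd_mul_right hd, by omega, by simp⟩

lemma int_decomp (p M x : Int) (e : Nat) (hp : Prime p) (hp2 : 2 ≤ p) (hM : 0 < M) :
    (0 < x ∧ x ∣ M * p ^ e) ↔ ∃ b, (0 < b ∧ b ∣ M) ∧ ∃ j, j ≤ e ∧ x = b * p ^ j := by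
  constructor
  · rintro ⟨hx0, hxd⟩
    have hpn : p.toNat.Prime := by
      rw [Int.prime_iff_natAbs_prime] at hp
      have : p.natAbs = p.toNat := by omega
      rwa [this] at hp
    have hxc : ((x.toNat : Int)) = x := Int.toNat_of_nonneg (by omega)
    have hMc : ((M.toNat : Int)) = M := Int.toNat_of_nonneg (by omega)
    have hpc : ((p.toNat : Int)) = p := Int.toNat_of_nonneg (by omega)
    have hxd' : x.toNat ∣ M.toNat * p.toNat ^ e := by
      rw [← Int.natCast_dvd_natCast]
      push_cast
      rw [hxc, hMc, hpc]
      exact hxd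
    obtain ⟨b, j, hb, hj, hd⟩ := nat_decomp p.toNat M.toNat hpn e x.toNat hxd'
    have hb0 : 0 < b := by
      rcases Nat.eq_zero_or_pos b with rfl | h
      · simp at hd; omega
      · exact h
    refine ⟨(b:Int), ⟨by exact_mod_cast hb0, ?_⟩, j, hj, ?_⟩
    · rw [← hMc]; exact_mod_cast hb
    · rw [← hxc, hd]; push_cast; rw [hpc]
  · rintro ⟨b, ⟨hb0, hbd⟩, j, hj, rfl⟩
    have hp0 : (0:Int) < p := by omega
    constructor
    · positivity
    · exact mul_dvd_mul hbd (pow_dvd_pow p hj)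

lemma groups_fold_spec : ∀ (G : List (Int × Int)) (S : PySem.Set Int) (M : Int), 0 < M →
    (∀ pe ∈ G, 0 < pe.1 ∧ Prime pe.1 ∧ 1 ≤ pe.2) → S.Nodup → (∀ x, x ∈ S ↔ 0 < x ∧ x ∣ M) →
    (G.foldl (fun products pe =>
        products.foldl (fun new base =>
            ((PySem.List.pyRange 0 (pe.2 + 1) 1).foldl
                (fun st _ => (PySem.Set.add st.1 (base * st.2), st.2 * pe.1)) (new, (1:Int))).1)
          (PySem.Set.ofList [])) S).Nodup ∧
    (∀ x, x ∈ G.foldl (fun products pe =>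
        products.foldl (fun new base =>
            ((PySem.List.pyRange 0 (pe.2 + 1) 1).foldl
                (fun st _ => (PySem.Set.add st.1 (base * st.2), st.2 * pe.1)) (new, (1:Int))).1)
          (PySem.Set.ofList [])) S ↔ 0 < x ∧ x ∣ M * prodG G) := by
  intro G
  induction G with
  | nil =>
    intro S M hM hG hS hSmem
    refine ⟨hS, fun x => ?_⟩
    simp only [List.foldl_nil, prodG, List.map_nil, List.prod_nil, mul_one]
    exact hSmem x
  | cons pe t ih =>
    intro S M hM hG hS hSmem
    obtain ⟨hp0, hpp, hpe⟩ := hG pe (List.mem_cons_self ..)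
    have hp2 : 2 ≤ pe.1 := by have := hpp.ne_one; omega
    have hkc : pe.2 + 1 = (((pe.2 + 1).toNat : Nat) : Int) := by omega
    obtain ⟨bf1, bf2⟩ := baseFold_spec pe.1 (pe.2 + 1) (pe.2 + 1).toNat hkc S (PySem.Set.ofList [])
    have hS1mem : ∀ x, x ∈ S.foldl (fun new base =>
        ((PySem.List.pyRange 0 (pe.2 + 1) 1).foldl
            (fun st _ => (PySem.Set.add st.1 (base * st.2), st.2 * pe.1)) (new, (1:Int))).1)
          (PySem.Set.ofList []) ↔ 0 < x ∧ x ∣ M * pe.1 ^ pe.2.toNat := by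
      intro x
      rw [bf1 x, int_decomp pe.1 M x pe.2.toNat hpp hp2 hM]
      simp only [PySem.Set.mem_ofList, List.not_mem_nil, false_or]
      constructor
      · rintro ⟨b, hb, j, hj, rfl⟩
        exact ⟨b, (hSmem b).1 hb, j, by omega, rfl⟩
      · rintro ⟨b, hb, j, hj, rfl⟩
        exact ⟨b, (hSmem b).2 hb, j, by omega, rfl⟩
    have hS1nodup := bf2 (PySem.Set.nodup_ofList [])
    have hM1 : 0 < M * pe.1 ^ pe.2.toNat := by positivity
    obtain ⟨n1, m1⟩ := ih _ (M * pe.1 ^ pe.2.toNat) hM1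
      (fun q hq => hG q (List.mem_cons_of_mem pe hq)) hS1nodup hS1mem
    rw [List.foldl_cons]
    refine ⟨n1, fun x => ?_⟩
    rw [m1 x]
    have : M * pe.1 ^ pe.2.toNat * prodG t = M * prodG (pe :: t) := by
      simp only [prodG, List.map_cons, List.prod_cons]; ring
    rw [this]

lemma A_products_spec (n : Int) (hn : 2 ≤ n) :
    ((((get_prime_factorisation n).foldl groupStep []).foldl (fun products pe =>
        products.foldl (fun new base =>
            ((PySem.List.pyRange 0 (pe.2 + 1) 1).foldl
                (fun st _ => (PySem.Set.add st.1 (base * st.2), st.2 * pe.1)) (new, (1:Int))).1)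
          (PySem.Set.ofList [])) (PySem.Set.ofList [1]))).Nodup ∧
    ∀ x, x ∈ ((((get_prime_factorisation n).foldl groupStep []).foldl (fun products pe =>
        products.foldl (fun new base =>
            ((PySem.List.pyRange 0 (pe.2 + 1) 1).foldl
                (fun st _ => (PySem.Set.add st.1 (base * st.2), st.2 * pe.1)) (new, (1:Int))).1)
          (PySem.Set.ofList [])) (PySem.Set.ofList [1]))) ↔ 0 < x ∧ x ∣ n := by
  obtain ⟨hprod, hfac⟩ := factorisation_spec n hn
  obtain ⟨hg1, hg2⟩ := group_fold_spec (get_prime_factorisation n) [] (by simp)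
  have hGprop : ∀ pe ∈ (get_prime_factorisation n).foldl groupStep [],
      0 < pe.1 ∧ Prime pe.1 ∧ 1 ≤ pe.2 := by
    intro pe hpe
    obtain ⟨hmem, hle⟩ := hg2 pe hpe
    rcases hmem with hmem | hmem
    · obtain ⟨h0, hp⟩ := hfac pe.1 hmem
      exact ⟨h0, hp, hle⟩
    · simp at hmem
  have hprodG : prodG ((get_prime_factorisation n).foldl groupStep []) = n := by
    rw [hg1, hprod]
    simp [prodG]
  have hinit : ∀ x : Int, x ∈ PySem.Set.ofList [1] ↔ 0 < x ∧ x ∣ (1:Int) := by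
    intro x
    rw [PySem.Set.mem_ofList]
    simp only [List.mem_singleton]
    constructor
    · rintro rfl; exact ⟨one_pos, dvd_refl 1⟩
    · rintro ⟨h0, hd⟩
      rcases Int.isUnit_iff.1 (isUnit_of_dvd_one hd) with rfl | rfl
      · rfl
      · omega
  obtain ⟨hnodup, hmem⟩ := groups_fold_spec ((get_prime_factorisation n).foldl groupStep [])
    (PySem.Set.ofList [1]) 1 one_pos hGprop (PySem.Set.nodup_ofList [1]) hinit
  refine ⟨hnodup, fun x => ?_⟩
  rw [hmem x, hprodG, one_mul]

lemma small_A (n : Int) (hn : ¬ 2 ≤ n) :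
    get_prime_products n = [] := by
  have hloop : gpfLoop 2 n [] (by omega) = ([], n) := by
    rw [gpfLoop]
    rw [dif_neg (show ¬ (2:Int)^2 ≤ n by omega)]
  have hfac : get_prime_factorisation n = [n] := by
    unfold get_prime_factorisation
    rw [hloop]
    rfl
  have hgrp : [n].foldl groupStep [] = [(n, 1)] := by
    simp [groupStep]
  unfold get_prime_products
  rw [hfac, hgrp]
  rw [PySem.List.sorted_eq_nil_iff]
  rw [List.eq_nil_iff_forall_not_mem]
  intro x hx
  rw [List.foldl_cons, List.foldl_nil] at hx
  rw [mem_filtAdd] at hx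
  rcases hx with hx | ⟨hxm, hx1⟩
  · simp at hx
  · obtain ⟨bf1, _⟩ := baseFold_spec n ((1:Int) + 1) 2 (by norm_num)
      (PySem.Set.ofList [1]) (PySem.Set.ofList [])
    rw [bf1] at hxm
    rcases hxm with hxm | ⟨b, hb, j, hj, rfl⟩
    · simp at hxm
    · rw [PySem.Set.mem_ofList, List.mem_singleton] at hb
      subst hb
      interval_cases j
      · simp at hx1
      · simp at hx1; omega

lemma small_B (n : Int) (hn : ¬ 2 ≤ n) :
    get_prime_products_alt n = [] := by
  unfold get_prime_products_alt
  rw [PySem.List.sorted_eq_nil_iff, List.eq_nil_iff_forall_not_mem]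
  intro x hx
  rw [mem_filtAdd] at hx
  rcases hx with hx | ⟨hxm, hx1⟩
  · simp at hx
  · rw [divLoop_mem] at hxm
    rcases hxm with hxm | ⟨j, hj1, hj2, hj3, hx⟩
    · simp at hxm
    · have hj : j = 1 := by nlinarith
      subst hj
      have hn1 : n = 1 := by nlinarith
      subst hn1
      have : PySem.Int.floordiv 1 1 = 1 := by decide
      rcases hx with rfl | rfl
      · omega
      · omega


-- ===== VERDICT (by name: the statement is the Claim_ definition above) =====
theorem get_prime_products_spec : Claim_equal_get_prime_products := by

  intro n _
  unfold Spec_get_prime_products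
  by_cases hn2 : 2 ≤ n
  · obtain ⟨hAnodup, hAmem⟩ := A_products_spec n hn2
    unfold get_prime_products get_prime_products_alt
    apply PySem.List.sorted_eq_sorted_of_perm _ _ _ (fun a b h => h)
    rw [List.perm_ext_iff_of_nodup
      (nodup_filtAdd _ _ (PySem.Set.nodup_ofList []))
      (nodup_filtAdd _ _ (PySem.Set.nodup_ofList []))]
    intro x
    rw [mem_filtAdd, mem_filtAdd]
    rw [hAmem x, B_mem n (by omega) x (by omega)]
    simp only [PySem.Set.mem_ofList, List.not_mem_nil, false_or]
    constructor
    · rintro ⟨⟨h0, hd⟩, h1⟩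
      exact ⟨⟨by omega, hd⟩, h1⟩
    · rintro ⟨⟨h0, hd⟩, h1⟩
      exact ⟨⟨by omega, hd⟩, h1⟩
  · rw [small_A n hn2, small_B n hn2]
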